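-- pv_equiv track=rewrite | github.com/MrBrasilMan/iMuffin | parser.py | rm_p
-- ===== SOURCE A (Python) =====
-- def rm_p(toparse):
--   #Turn into list
--   list_parse = list(toparse)
--   #We want to add all text not in <>
--   #Style and script info will still show, but that is a problem for another time
--   add_to_string = True
--   #The string to return
--   toreturn = ""
--   #For all chars in html body
--   for letter in list_parse:
--     #If within <> then ingnore
--     if letter == ">":
--       add_to_string = True
--     elif letter == "<":
--       add_to_string = False
--     #Add chars if add to string is true (will ingore > because exception)
--     elif add_to_string == True and letter != ">":
--       toreturn = toreturn + letter
--   return toreturn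
-- ===== SOURCE B (Python) =====
-- import re
--
-- _TAG = re.compile(r'<[^>]*>?')
--
-- def rm_p(toparse):
--   # Delete every '<'...'>' tag (or '<' to end of string if unclosed),
--   # then drop stray '>' characters that appear outside any tag.
--   return _TAG.sub('', toparse).replace('>', '')
-- ===== Notes on version B (the rewrite author's own statement) =====
-- stated objective: faster
-- what changed: Replaces the hand-written char-by-char boolean-state scan with quadratic string concatenation by a regex substitution deleting each '<'...'>' tag (unclosed '<' to end of string) followed by removal of stray '>' characters.
import Mathlib
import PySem

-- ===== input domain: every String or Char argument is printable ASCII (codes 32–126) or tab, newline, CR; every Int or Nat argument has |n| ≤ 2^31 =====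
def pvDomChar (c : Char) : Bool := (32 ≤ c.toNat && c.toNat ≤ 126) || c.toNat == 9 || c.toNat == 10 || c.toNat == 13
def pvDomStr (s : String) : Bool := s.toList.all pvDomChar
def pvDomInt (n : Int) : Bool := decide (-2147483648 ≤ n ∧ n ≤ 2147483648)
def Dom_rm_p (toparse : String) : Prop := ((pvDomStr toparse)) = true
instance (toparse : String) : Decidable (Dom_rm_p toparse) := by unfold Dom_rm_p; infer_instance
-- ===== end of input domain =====

-- B replaces A's boolean-state character scan by tag deletion (regex '<[^>]*>?') plus removal of stray '>' — idiomatic, same result.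

-- ===== PORT A =====
-- A: scan chars with a boolean flag, appending kept chars to the accumulated string.
def rm_p (toparse : String) : String :=
  let list_parse := toparse.toList
  (list_parse.foldl
    (fun (st : Bool × String) letter =>
      if letter = '>' then (true, st.2)
      else if letter = '<' then (false, st.2)
      else if st.1 = true ∧ letter ≠ '>' then (st.1, st.2 ++ String.ofList [letter])
      else st)
    (true, "")).2

-- ===== PORT B =====
-- Hand port of the regex r'<[^>]*>?': delete from each '<' through the next '>' inclusive
-- (or to end of string if unclosed); exact for this pattern on all inputs.
mutual
def rmTagsSkip : List Char → List Char
  | [] => []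
  | c :: cs => if c = '<' then rmTagsIn cs else c :: rmTagsSkip cs
def rmTagsIn : List Char → List Char
  | [] => []
  | c :: cs => if c = '>' then rmTagsSkip cs else rmTagsIn cs
end

-- then .replace('>', '') : drop remaining '>' characters.
def rm_p_alt (toparse : String) : String :=
  String.ofList ((rmTagsSkip toparse.toList).filter (fun c => c ≠ '>'))

-- ===== PRECONDITION & SPEC =====
def Spec_rm_p (toparse : String) (out : String) : Prop := out = rm_p_alt toparse
instance (toparse : String) (out : String) : Decidable (Spec_rm_p toparse out) := by unfold Spec_rm_p; infer_instance

-- ===== CLAIM (what is proved, stated in full; the proofs are below) =====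
def Claim_equal_rm_p : Prop := ∀ (toparse : String), Dom_rm_p toparse → Spec_rm_p toparse (rm_p toparse)

-- ===== LEMMAS AND PROOFS =====

-- abbreviation for A's fold step (proof-local)
def rmStep (st : Bool × String) (letter : Char) : Bool × String :=
  if letter = '>' then (true, st.2)
  else if letter = '<' then (false, st.2)
  else if st.1 = true ∧ letter ≠ '>' then (st.1, st.2 ++ String.ofList [letter])
  else st

theorem rm_p_loop (l : List Char) :
    (∀ acc : String, ((l.foldl rmStep (true, acc)).2).toList
        = acc.toList ++ (rmTagsSkip l).filter (fun c => c ≠ '>'))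
    ∧ (∀ acc : String, ((l.foldl rmStep (false, acc)).2).toList
        = acc.toList ++ (rmTagsIn l).filter (fun c => c ≠ '>')) := by
  induction l with
  | nil => simp [rmTagsSkip, rmTagsIn]
  | cons c cs ih =>
    constructor <;> intro acc
    · by_cases h1 : c = '>'
      · subst h1
        simpa [rmTagsSkip, List.foldl_cons, rmStep] using ih.1 acc
      · by_cases h2 : c = '<'
        · subst h2
          simpa [rmTagsSkip, List.foldl_cons, rmStep] using ih.2 acc
        · have := ih.1 (acc ++ String.ofList [c])
          simp [rmTagsSkip, List.foldl_cons, rmStep, h1, h2, this]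
    · by_cases h1 : c = '>'
      · subst h1
        simpa [rmTagsIn, List.foldl_cons, rmStep] using ih.1 acc
      · have := ih.2 acc
        simp [rmTagsIn, List.foldl_cons, rmStep, h1, this]

-- ===== VERDICT (by name: the statement is the Claim_ definition above) =====
theorem rm_p_spec : Claim_equal_rm_p := by
  intro toparse _
  unfold Spec_rm_p rm_p rm_p_alt
  have h := (rm_p_loop toparse.toList).1 ""
  apply String.toList_injective
  simpa [rmStep] using h
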